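-- pv_equiv track=rewrite | github.com/asuramaya/chronohorn | python/chronohorn/fleet/dispatch.py | split_marked_sections
-- ===== SOURCE A (Python) =====
-- def split_marked_sections(output: str) -> dict[str, list[str]]:
--     sections: dict[str, list[str]] = {}
--     current: str | None = None
--     for raw_line in output.splitlines():
--         line = raw_line.rstrip("\n")
--         if line.startswith("__") and line.endswith("__"):
--             current = line.strip("_")
--             sections[current] = []
--             continue
--         if current is not None:
--             sections[current].append(line)
--     return sections
-- ===== SOURCE B (Python) =====
-- def _is_marker(line):
--     return line.startswith("__") and line.endswith("__")
--
--
-- def _span_body(lines):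
--     """Split lines into (leading non-marker lines, remainder starting at the first marker)."""
--     body = []
--     for i, line in enumerate(lines):
--         if _is_marker(line):
--             return body, lines[i:]
--         body.append(line)
--     return body, []
--
--
-- def split_marked_sections(output: str) -> dict[str, list[str]]:
--     # lines before the first marker are dropped
--     _, rest = _span_body(output.splitlines())
--     sections: dict[str, list[str]] = {}
--     while rest:
--         body, rest2 = _span_body(rest[1:])
--         sections[rest[0].strip("_")] = body
--         rest = rest2
--     return sections
-- ===== Notes on version B (the rewrite author's own statement) =====
-- stated objective: alternative
-- what changed: A makes one stateful pass holding the currently open section key and appending each line to the dict one at a time; B instead decomposes the line list into marker-headed chunks with a span helper and assigns each whole section body at once.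
import Mathlib
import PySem

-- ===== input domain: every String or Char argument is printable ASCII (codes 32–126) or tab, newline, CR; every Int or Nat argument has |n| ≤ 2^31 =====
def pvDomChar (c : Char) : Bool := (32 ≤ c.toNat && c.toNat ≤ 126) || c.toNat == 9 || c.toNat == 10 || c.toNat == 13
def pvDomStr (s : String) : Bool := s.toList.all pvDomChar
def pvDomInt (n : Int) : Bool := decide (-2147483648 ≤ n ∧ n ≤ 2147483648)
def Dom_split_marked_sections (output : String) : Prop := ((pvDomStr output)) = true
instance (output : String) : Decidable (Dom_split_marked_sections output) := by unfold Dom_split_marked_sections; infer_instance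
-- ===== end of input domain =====

-- B replaces A's stateful line-by-line loop (current-key state, per-line dict appends) by a
-- span/chunk decomposition: repeatedly split off the whole block of lines up to the next marker
-- and assign it at once; same return value (objective: alternative decomposition).

-- ===== PORT A =====
-- exact port of raw_line.rstrip("\n"): drop trailing '\n' characters
def pvRstripNl (s : String) : String :=
  String.ofList ((s.toList.reverse.dropWhile (fun c => c == '\n')).reverse)

def pvALoop : List String → PySem.Dict String (List String) → Option String →
    PySem.Dict String (List String)
  | [], sections, _ => sections
  | raw_line :: rest, sections, current =>
    let line := pvRstripNl raw_line
    if PySem.Str.startswith line "__" && PySem.Str.endswith line "__" then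
      let cur := PySem.Str.stripChars line "_"
      pvALoop rest (sections.insert cur []) (some cur)
    else
      match current with
      | none => pvALoop rest sections none
      | some k => pvALoop rest (sections.modify k [] (fun v => v ++ [line])) (some k)

def split_marked_sections (output : String) : List (String × List String) :=
  (pvALoop (PySem.Str.splitlines output) PySem.Dict.empty none).items

-- ===== PORT B =====
def pvIsMarker (line : String) : Bool :=
  PySem.Str.startswith line "__" && PySem.Str.endswith line "__"

-- port of _span_body: (leading non-marker lines, remainder from the first marker on)
def pvSpanBody : List String → List String × List String
  | [] => ([], [])
  | line :: rest =>
    if pvIsMarker line then ([], line :: rest)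
    else
      let p := pvSpanBody rest
      (line :: p.1, p.2)

-- needed by pvBLoop's decreasing_by
theorem pvSpanBody_snd_length (ls : List String) : (pvSpanBody ls).2.length ≤ ls.length := by
  induction ls with
  | nil => simp [pvSpanBody]
  | cons l rest ih =>
    simp only [pvSpanBody]
    split
    · simp
    · simpa using Nat.le_succ_of_le ih

def pvBLoop : List String → PySem.Dict String (List String) → PySem.Dict String (List String)
  | [], sections => sections
  | m :: rest, sections =>
    pvBLoop (pvSpanBody rest).2
      (sections.insert (PySem.Str.stripChars m "_") (pvSpanBody rest).1)
termination_by ls _ => ls.length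
decreasing_by exact Nat.lt_succ_of_le (pvSpanBody_snd_length rest)

def split_marked_sections_alt (output : String) : List (String × List String) :=
  (pvBLoop (pvSpanBody (PySem.Str.splitlines output)).2 PySem.Dict.empty).items

-- ===== PRECONDITION & SPEC =====
def Spec_split_marked_sections (output : String) (out : List (String × List String)) : Prop := out = split_marked_sections_alt output
instance (output : String) (out : List (String × List String)) : Decidable (Spec_split_marked_sections output out) := by unfold Spec_split_marked_sections; infer_instance

-- ===== CLAIM (what is proved, stated in full; the proofs are below) =====
def Claim_equal_split_marked_sections : Prop := ∀ (output : String), Dom_split_marked_sections output → Spec_split_marked_sections output (split_marked_sections output)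

-- ===== LEMMAS AND PROOFS =====

-- appending one element to the value just inserted at k equals inserting the extended value
theorem pv_modify_insert_append (d : PySem.Dict String (List String)) (k : String)
    (v : List String) (l : String) :
    (d.insert k v).modify k [] (fun w => w ++ [l]) = d.insert k (v ++ [l]) := by
  simp [PySem.Dict.modify, PySem.Dict.getD_insert_self, PySem.Dict.insert_insert_self]

-- every line splitlines.go produces consists of characters the break-test rejects
theorem pv_go_no_break (p : Char → Bool)
    (cs cur : List Char) (acc : List (List Char)) :
      (∀ c ∈ cur, p c = false) → (∀ l ∈ acc, ∀ c ∈ l, p c = false) →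
      ∀ l ∈ PySem.Chars.splitlines.go p cs cur acc, ∀ c ∈ l, p c = false := by
  have haux : ∀ (cur : List Char) (acc : List (List Char)),
      (∀ c ∈ cur, p c = false) → (∀ l ∈ acc, ∀ c ∈ l, p c = false) →
      ∀ l ∈ cur.reverse :: acc, ∀ c ∈ l, p c = false := by
    intro cur acc h1 h2 l hl
    rcases List.mem_cons.mp hl with h | h
    · intro c hc; exact h1 c (by simpa [h] using hc)
    · exact h2 l h
  fun_induction PySem.Chars.splitlines.go p cs cur acc with
  | case1 cur acc _ =>
    intro _ h2 l hl
    exact h2 l (List.mem_reverse.mp hl)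
  | case2 cur acc _ =>
    intro h1 h2 l hl
    exact haux cur acc h1 h2 l (List.mem_reverse.mp hl)
  | case3 rest cur acc ih =>
    intro h1 h2
    exact ih (by simp) (haux cur acc h1 h2)
  | case4 c rest cur acc _ _ ih =>
    intro h1 h2
    exact ih (by simp) (haux cur acc h1 h2)
  | case5 c rest cur acc _ hb ih =>
    intro h1 h2
    refine ih ?_ h2
    intro x hx
    rcases List.mem_cons.mp hx with h | h
    · subst h; simpa using hb
    · exact h1 x h

theorem pv_chars_splitlines_no_nl (s : List Char) :
    ∀ cs ∈ PySem.Chars.splitlines s, '\n' ∉ cs := by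
  intro cs hcs hmem
  unfold PySem.Chars.splitlines at hcs
  have hp := pv_go_no_break _ s [] [] (by simp) (by simp) cs hcs '\n' hmem
  simp at hp

theorem pv_rstrip_of_no_nl (cs : List Char) (h : '\n' ∉ cs) :
    pvRstripNl (String.ofList cs) = String.ofList cs := by
  unfold pvRstripNl
  congr 1
  have hd : cs.reverse.dropWhile (fun c => c == '\n') = cs.reverse := by
    rw [List.dropWhile_eq_self_iff]
    intro hl hc
    exact h (by
      have : cs.reverse[0] ∈ cs.reverse := List.getElem_mem hl
      rw [List.mem_reverse] at this
      simpa [show cs.reverse[0] = '\n' by simpa using hc] using this)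
  simp [hd]

-- A's rstrip("\n") is the identity on every line splitlines yields
theorem pv_splitlines_no_nl (s : String) :
    ∀ l ∈ PySem.Str.splitlines s, pvRstripNl l = l := by
  intro l hl
  unfold PySem.Str.splitlines at hl
  rcases List.mem_map.mp hl with ⟨cs, hcs, rfl⟩
  exact pv_rstrip_of_no_nl cs (pv_chars_splitlines_no_nl _ cs hcs)

-- invariant while a section is open: A's per-line appends amount to inserting the whole span
theorem pv_aLoop_some (ls : List String) :
    ∀ (d : PySem.Dict String (List String)) (k : String) (acc : List String),
      (∀ l ∈ ls, pvRstripNl l = l) →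
      pvALoop ls (d.insert k acc) (some k)
        = pvBLoop (pvSpanBody ls).2 (d.insert k (acc ++ (pvSpanBody ls).1)) := by
  induction ls with
  | nil => intro d k acc _; simp [pvALoop, pvSpanBody, pvBLoop]
  | cons l rest ih =>
    intro d k acc h
    have hl : pvRstripNl l = l := h l (by simp)
    have hrest : ∀ x ∈ rest, pvRstripNl x = x := fun x hx => h x (by simp [hx])
    by_cases hm : pvIsMarker l = true
    · have hm' : (PySem.Str.startswith l "__" && PySem.Str.endswith l "__") = true := by
        simpa [pvIsMarker] using hm
      simp only [pvALoop, hl, hm', if_true]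
      rw [ih (d.insert k acc) _ [] hrest]
      simp only [pvSpanBody, hm, if_true]
      rw [pvBLoop]
      simp
    · have hm' : (PySem.Str.startswith l "__" && PySem.Str.endswith l "__") = false := by
        simpa [pvIsMarker] using hm
      simp only [pvALoop, hl, hm', Bool.false_eq_true, if_false]
      rw [pv_modify_insert_append, ih d k (acc ++ [l]) hrest]
      simp [pvSpanBody, hm]

-- before the first marker A skips lines, exactly B's initial span drop
theorem pv_aLoop_none (ls : List String) :
    ∀ (d : PySem.Dict String (List String)),
      (∀ l ∈ ls, pvRstripNl l = l) →
      pvALoop ls d none = pvBLoop (pvSpanBody ls).2 d := by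
  induction ls with
  | nil => intro d _; simp [pvALoop, pvSpanBody, pvBLoop]
  | cons l rest ih =>
    intro d h
    have hl : pvRstripNl l = l := h l (by simp)
    have hrest : ∀ x ∈ rest, pvRstripNl x = x := fun x hx => h x (by simp [hx])
    by_cases hm : pvIsMarker l = true
    · have hm' : (PySem.Str.startswith l "__" && PySem.Str.endswith l "__") = true := by
        simpa [pvIsMarker] using hm
      simp only [pvALoop, hl, hm', if_true]
      rw [pv_aLoop_some rest d _ [] hrest]
      simp only [pvSpanBody, hm, if_true]
      rw [pvBLoop]
      simp
    · have hm' : (PySem.Str.startswith l "__" && PySem.Str.endswith l "__") = false := by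
        simpa [pvIsMarker] using hm
      simp only [pvALoop, hl, hm', Bool.false_eq_true, if_false]
      rw [ih d hrest]
      simp [pvSpanBody, hm]

-- ===== VERDICT (by name: the statement is the Claim_ definition above) =====
theorem split_marked_sections_spec : Claim_equal_split_marked_sections := by
  intro output _
  unfold Spec_split_marked_sections split_marked_sections split_marked_sections_alt
  rw [pv_aLoop_none _ _ (pv_splitlines_no_nl output)]
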